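-- pv_equiv track=rewrite | github.com/sekocha/pyclupan | src/pyclupan/misc/dd/dd_node.py | convert_occupation_to_element
-- ===== SOURCE A (Python) =====
-- def convert_occupation_to_element(occupation):
--
--     max_lattice_id = max([oc2 for oc1 in occupation for oc2 in oc1])
--     elements_lattice = [[] for i in range(max_lattice_id + 1)]
--     for e, oc1 in enumerate(occupation):
--         for oc2 in oc1:
--             elements_lattice[oc2].append(e)
--     elements_lattice = [sorted(e1) for e1 in elements_lattice]
--
--     return elements_lattice
-- ===== SOURCE B (Python) =====
-- def convert_occupation_to_element(occupation):
--
--     max_lattice_id = max(oc2 for oc1 in occupation for oc2 in oc1)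
--     return [
--         [e for e, oc1 in enumerate(occupation) for oc2 in oc1 if oc2 == L]
--         for L in range(max_lattice_id + 1)
--     ]
-- ===== Notes on version B (the rewrite author's own statement) =====
-- stated objective: simpler
-- what changed: Instead of allocating a bucket table, appending to it via indexed mutation and sorting every bucket afterwards, B builds each bucket directly with one comprehension per lattice id L, collecting e once per occurrence of L (no sorted() needed since e is emitted in increasing order); Pre_ excludes occupations containing a negative occupation id, an input naming no bucket, on which A either raises IndexError or its list indexing places elements in bucket max_id+1+id (Python's negative-index rule) while B's per-id scan ignores it; neither value is specified there.
-- outside the precondition, e.g. on convert_occupation_to_element([[0], [-1]]): A returns [[0, 1]], B returns [[0]]; on convert_occupation_to_element([[-1]]): A raises IndexError, B returns []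
import Mathlib
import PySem

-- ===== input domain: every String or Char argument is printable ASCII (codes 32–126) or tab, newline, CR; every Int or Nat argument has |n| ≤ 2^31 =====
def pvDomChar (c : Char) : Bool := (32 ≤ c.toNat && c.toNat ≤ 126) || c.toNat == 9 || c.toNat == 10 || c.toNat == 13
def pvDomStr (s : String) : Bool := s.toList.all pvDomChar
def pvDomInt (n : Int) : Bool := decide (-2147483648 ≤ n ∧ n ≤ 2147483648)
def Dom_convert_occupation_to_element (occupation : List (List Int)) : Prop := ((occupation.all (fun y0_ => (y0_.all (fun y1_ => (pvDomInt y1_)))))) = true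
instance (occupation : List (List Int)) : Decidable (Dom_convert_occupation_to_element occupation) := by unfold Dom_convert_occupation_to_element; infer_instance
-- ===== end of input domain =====

-- B replaces A's bucket table + indexed mutation + per-bucket sort by one direct comprehension
-- per lattice id; Pre_ excludes occupations containing a negative id (see its comment).


-- ===== PORT A =====
-- elements_lattice[oc2].append(e) : indexed read-modify-write; pyGetD/pySetD are exact
-- under Pre_ (the index is then in range — Python's negative-index rule included — so A does not raise)
def pvFillA (bs : List (List Int)) (e : Int) (oc1 : List Int) : List (List Int) :=
  oc1.foldl (fun bs oc2 => PySem.List.pySetD bs oc2 (PySem.List.pyGetD bs oc2 [] ++ [e])) bs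

def convert_occupation_to_element (occupation : List (List Int)) : List (List Int) :=
  match PySem.List.max? (occupation.flatMap (fun oc1 => oc1)) (fun x => x) with
  | none => []  -- Python raises ValueError here (max of empty); excluded by Pre_
  | some m =>
    let elements_lattice := (PySem.List.pyRange 0 (m + 1) 1).map (fun _ => ([] : List Int))
    let filled := (PySem.List.enumerate occupation 0).foldl
      (fun bs p => pvFillA bs p.1 p.2) elements_lattice
    filled.map (fun e1 => PySem.List.sorted e1 (fun x => x) false)

-- ===== PORT B =====
def convert_occupation_to_element_alt (occupation : List (List Int)) : List (List Int) :=
  match PySem.List.max? (occupation.flatMap (fun oc1 => oc1)) (fun x => x) with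
  | none => []  -- Python raises ValueError here (max of empty); excluded by Pre_
  | some m =>
    (PySem.List.pyRange 0 (m + 1) 1).map (fun L =>
      (PySem.List.enumerate occupation 0).flatMap (fun p =>
        p.2.flatMap (fun oc2 => if oc2 = L then [p.1] else [])))

-- ===== PRECONDITION & SPEC =====
-- Pre_ excludes the inputs on which A raises — an occupation with no entries at all (max() of
-- an empty sequence raises ValueError) or one whose ids all lie below -(max_id+1), where
-- elements_lattice[oc2] raises IndexError — and occupations containing a negative occupation
-- id: such an id names no bucket, and there A's list indexing places the element in bucket
-- max_id+1+id (Python's negative-index rule) while B's per-id scan ignores it; neither value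
-- is specified for an id outside 0..max_id, so these inputs are left outside the claim.
def Pre_convert_occupation_to_element (occupation : List (List Int)) : Prop :=
  occupation.flatMap (fun oc1 => oc1) ≠ [] ∧
  ∀ x ∈ occupation.flatMap (fun oc1 => oc1), 0 ≤ x
instance (occupation : List (List Int)) : Decidable (Pre_convert_occupation_to_element occupation) := by unfold Pre_convert_occupation_to_element; infer_instance

def pvWitness_convert_occupation_to_element : List (List Int) := [[0, 1], [1]]

def Spec_convert_occupation_to_element (occupation : List (List Int)) (out : List (List Int)) : Prop := out = convert_occupation_to_element_alt occupation
instance (occupation : List (List Int)) (out : List (List Int)) : Decidable (Spec_convert_occupation_to_element occupation out) := by unfold Spec_convert_occupation_to_element; infer_instance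

-- ===== CLAIM (what is proved, stated in full; the proofs are below) =====
def Claim_equal_convert_occupation_to_element : Prop := ∀ (occupation : List (List Int)), Dom_convert_occupation_to_element occupation → Pre_convert_occupation_to_element occupation → Spec_convert_occupation_to_element occupation (convert_occupation_to_element occupation)

-- ===== LEMMAS AND PROOFS =====

-- the bucket for lattice id L collected from enumerated items (modulus nI = table size);
-- this is where A's indexed append places entries
def pvBucket (items : List (Int × List Int)) (nI : Int) (L : Int) : List Int :=
  items.flatMap (fun p => p.2.flatMap (fun oc2 => if PySem.Int.mod oc2 nI = L then [p.1] else []))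

lemma pvIdx_eq (n : Nat) (x : Int) (h1 : -(n : Int) ≤ x) (h2 : x < n) :
    PySem.List.pyIdx? n x = some (PySem.Int.mod x n).toNat := by
  have hn : 0 < (n : Int) := by omega
  rw [PySem.Int.mod_eq_emod_of_pos hn]
  simp only [PySem.List.pyIdx?]
  by_cases h0 : 0 ≤ x
  · rw [if_pos h0, if_pos h2, Option.some.injEq, Int.emod_eq_of_lt h0 h2]
  · rw [if_neg h0, if_pos h1, Option.some.injEq]
    have hmod : x % (n : Int) = x + n := by
      rw [Int.emod_eq_add_self_emod]
      exact Int.emod_eq_of_lt (by omega) (by omega)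
    rw [hmod]
    omega

lemma pvSet_getD (bs : List (List Int)) (i : Nat) (v : List Int) (L : Nat)
    (h : i < bs.length) :
    (bs.set i v).getD L [] = if i = L then v else bs.getD L [] := by
  simp [List.getD_eq_getElem?_getD, List.getElem?_set]
  split
  · simp [*]
  · rfl

lemma pvFillA_length (oc1 : List Int) (bs : List (List Int)) (e : Int) :
    (pvFillA bs e oc1).length = bs.length := by
  induction oc1 generalizing bs with
  | nil => rfl
  | cons x t ih => simp [pvFillA, List.foldl_cons] at *; rw [ih]; simp

lemma pvFillA_getD (oc1 : List Int) (bs : List (List Int)) (e : Int) (n : Nat)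
    (hn : bs.length = n) (h : ∀ x ∈ oc1, -(n : Int) ≤ x ∧ x < n) (L : Nat) :
    (pvFillA bs e oc1).getD L [] =
      bs.getD L [] ++ oc1.flatMap
        (fun oc2 => if PySem.Int.mod oc2 (n : Int) = (L : Int) then [e] else []) := by
  induction oc1 generalizing bs with
  | nil => simp [pvFillA]
  | cons x t ih =>
    obtain ⟨hx0, hxl⟩ := h x (List.mem_cons_self ..)
    have hnpos : 0 < (n : Int) := by omega
    have hjx : ((PySem.Int.mod x (n : Int)).toNat : Int) = PySem.Int.mod x (n : Int) := by
      have := PySem.Int.mod_nonneg x hnpos; omega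
    set j := (PySem.Int.mod x (n : Int)).toNat with hj
    have hjlt : j < bs.length := by
      have := PySem.Int.mod_lt x hnpos; omega
    have hidx : PySem.List.pyIdx? bs.length x = some j := by
      rw [hn]; exact pvIdx_eq n x hx0 hxl
    have hset : PySem.List.pySetD bs x (PySem.List.pyGetD bs x [] ++ [e]) =
        bs.set j (bs[j] ++ [e]) := by
      simp [PySem.List.pySetD, PySem.List.pySet?, PySem.List.pyGetD, PySem.List.pyGet?,
        hidx, List.getElem?_eq_getElem hjlt]
    have ht : ∀ y ∈ t, -(n : Int) ≤ y ∧ y < n := fun y hy => h y (List.mem_cons_of_mem _ hy)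
    simp only [pvFillA, List.foldl_cons] at *
    rw [hset, ih _ (by simpa using hn) ht, pvSet_getD _ _ _ _ hjlt]
    by_cases hLx : PySem.Int.mod x (n : Int) = (L : Int)
    · have hxL : j = L := by omega
      have hbL : bs.getD L [] = bs[j] := by
        rw [← hxL]
        simp [List.getD_eq_getElem?_getD, List.getElem?_eq_getElem hjlt]
      rw [if_pos hxL, List.flatMap_cons, if_pos hLx, hbL]
      simp
    · have hxL : j ≠ L := by omega
      rw [if_neg hxL, List.flatMap_cons, if_neg hLx]
      simp

lemma pvFill_length (items : List (Int × List Int)) (bs : List (List Int)) :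
    (items.foldl (fun bs p => pvFillA bs p.1 p.2) bs).length = bs.length := by
  induction items generalizing bs with
  | nil => rfl
  | cons q t ih => simp [List.foldl_cons, ih, pvFillA_length]

lemma pvFill_getD (items : List (Int × List Int)) (bs : List (List Int)) (n : Nat)
    (hn : bs.length = n)
    (h : ∀ p ∈ items, ∀ x ∈ p.2, -(n : Int) ≤ x ∧ x < n) (L : Nat) :
    (items.foldl (fun bs p => pvFillA bs p.1 p.2) bs).getD L [] =
      bs.getD L [] ++ pvBucket items (n : Int) (L : Int) := by
  induction items generalizing bs with
  | nil => simp [pvBucket]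
  | cons q t ih =>
    have hq := h q (List.mem_cons_self ..)
    have ht : ∀ p ∈ t, ∀ x ∈ p.2, -(n : Int) ≤ x ∧ x < n :=
      fun p hp => h p (List.mem_cons_of_mem _ hp)
    simp only [List.foldl_cons]
    rw [ih _ (by rw [pvFillA_length, hn]) ht, pvFillA_getD _ _ _ _ hn hq]
    simp [pvBucket]

lemma pvBucket_pairwise (items : List (Int × List Int)) (nI L : Int)
    (h : items.Pairwise (fun p q => p.1 < q.1)) :
    (pvBucket items nI L).Pairwise (· ≤ ·) := by
  induction items with
  | nil => simp [pvBucket]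
  | cons q t ih =>
    rw [List.pairwise_cons] at h
    have hmem : ∀ y ∈ q.2.flatMap (fun oc2 => if PySem.Int.mod oc2 nI = L then [q.1] else []),
        y = q.1 := by
      intro y hy
      simp only [List.mem_flatMap] at hy
      obtain ⟨x, _, hx⟩ := hy
      split at hx
      · simpa using hx
      · simp at hx
    rw [pvBucket, List.flatMap_cons, List.pairwise_append]
    refine ⟨?_, ih h.2, ?_⟩
    · exact List.pairwise_of_forall_mem_list
        (fun a ha b hb => by rw [hmem a ha, hmem b hb])
    · intro a ha b hb
      rw [hmem a ha]
      simp only [List.mem_flatMap] at hb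
      obtain ⟨p, hp, hbp⟩ := hb
      obtain ⟨x, _, hx⟩ := hbp
      have hb1 : b = p.1 := by
        split at hx
        · simpa using hx
        · simp at hx
      exact le_of_lt (hb1 ▸ h.1 p hp)

-- when every id is in [0, n), A's wraparound bucket coincides with B's plain-equality bucket
lemma pvBucket_eq_of_nonneg (items : List (Int × List Int)) (n : Nat) (L : Int)
    (h : ∀ p ∈ items, ∀ x ∈ p.2, 0 ≤ x ∧ x < n) :
    pvBucket items (n : Int) L =
      items.flatMap (fun p => p.2.flatMap (fun oc2 => if oc2 = L then [p.1] else [])) := by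
  induction items with
  | nil => rfl
  | cons q t ih =>
    have hq := h q (List.mem_cons_self ..)
    have ht : ∀ p ∈ t, ∀ x ∈ p.2, 0 ≤ x ∧ x < n :=
      fun p hp => h p (List.mem_cons_of_mem _ hp)
    simp only [pvBucket, List.flatMap_cons] at *
    rw [ih ht]
    congr 1
    apply List.flatMap_congr
    intro x hx
    obtain ⟨hx0, hxl⟩ := hq x hx
    have hnpos : 0 < (n : Int) := by omega
    rw [PySem.Int.mod_eq_emod_of_pos hnpos, Int.emod_eq_of_lt hx0 hxl]

-- ===== VERDICT (by name: the statement is the Claim_ definition above) =====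
theorem convert_occupation_to_element_spec : Claim_equal_convert_occupation_to_element := by
  intro occupation _ hpre
  obtain ⟨hne, hnonneg0⟩ := hpre
  unfold Spec_convert_occupation_to_element convert_occupation_to_element
    convert_occupation_to_element_alt
  set flat := occupation.flatMap (fun oc1 => oc1) with hflat
  obtain ⟨m, hm⟩ : ∃ m, PySem.List.max? flat (fun x => x) = some m := by
    rcases hmax : PySem.List.max? flat (fun x => x) with _ | m
    · exact absurd ((PySem.List.max?_eq_none_iff _ _).mp hmax) hne
    · exact ⟨m, rfl⟩
  have hmax : ∀ y ∈ flat, y ≤ m := PySem.List.max?_isMax hm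
  have hbnd : ∀ x ∈ flat, 0 ≤ x ∧ x ≤ m := fun x hx => ⟨hnonneg0 x hx, hmax x hx⟩
  have hm0 : 0 ≤ m := by
    have := hbnd m (PySem.List.max?_mem hm); omega
  rw [hm]
  simp only
  set n := (m + 1).toNat with hnn
  have hnI : ((n : Nat) : Int) = m + 1 := by omega
  set init := (PySem.List.pyRange 0 (m + 1) 1).map (fun _ => ([] : List Int)) with hinit
  have hlen : init.length = n := by
    simp [hinit, PySem.List.length_pyRange_one]
    omega
  have hb : ∀ p ∈ PySem.List.enumerate occupation 0, ∀ x ∈ p.2,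
      0 ≤ x ∧ x < n := by
    intro p hp x hx
    rw [PySem.List.mem_enumerate_iff] at hp
    obtain ⟨k, hk, rfl⟩ := hp
    have hxf : x ∈ flat := by
      rw [hflat, List.mem_flatMap]
      exact ⟨occupation[k], List.getElem_mem hk, hx⟩
    have := hbnd x hxf
    omega
  have hb' : ∀ p ∈ PySem.List.enumerate occupation 0, ∀ x ∈ p.2,
      -(n : Int) ≤ x ∧ x < n := by
    intro p hp x hx
    have := hb p hp x hx
    omega
  set filled := (PySem.List.enumerate occupation 0).foldl
    (fun bs p => pvFillA bs p.1 p.2) init with hfilled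
  have hfl : filled.length = n := by
    rw [hfilled, pvFill_length, hlen]
  apply List.ext_getElem
  · simp [hfl, PySem.List.length_pyRange_one]; omega
  · intro k hk1 hk2
    have hkf : k < filled.length := by simpa using hk1
    have hgetD : filled.getD k [] =
        pvBucket (PySem.List.enumerate occupation 0) (n : Int) (k : Int) := by
      rw [hfilled, pvFill_getD _ _ _ hlen hb']
      simp [hinit, List.getD]
    have hfk : filled[k] =
        pvBucket (PySem.List.enumerate occupation 0) (n : Int) (k : Int) := by
      rw [← hgetD]; simp [List.getD, List.getElem?_eq_getElem hkf]
    simp only [List.getElem_map, hfk]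
    rw [PySem.List.sorted_eq_self_of_pairwise _ _
      (pvBucket_pairwise _ _ _ (PySem.List.pairwise_lt_enumerate ..))]
    rw [pvBucket_eq_of_nonneg _ _ _ hb]
    simp [PySem.List.getElem_pyRange_one]
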